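-- pv_equiv track=rewrite | github.com/Redriel57/TER-M2QDCS | helper/bit_manipulation.py | nat2bl
-- ===== SOURCE A (Python) =====
-- from typing import Literal, List
--
-- bit = Literal[0, 1]
--
-- def nat2bl(pad: int, f: float) -> List[bit]:
--     """From natural to binary list"""
--     if f == 0:
--         return [0 for _ in range(pad)]
--     elif f % 2 == 1:
--         r = nat2bl(pad - 1, (f - 1) // 2)
--         return r + [1]
--     r = nat2bl(pad - 1, f // 2)
--     return r + [0]
-- ===== SOURCE B (Python) =====
-- def nat2bl(pad, f):
--     """From natural to binary list, via Python's built-in binary conversion."""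
--     if f == 0:
--         return [0] * pad
--     bits = [int(c) for c in bin(int(f))[2:]]
--     return [0] * (pad - len(bits)) + bits
-- ===== Notes on version B (the rewrite author's own statement) =====
-- stated objective: idiomatic
-- what changed: Replaces A's bit-by-bit recursion (one recursive call and list append per bit) with a single big-endian conversion via bin() plus arithmetic left-padding.
import Mathlib
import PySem

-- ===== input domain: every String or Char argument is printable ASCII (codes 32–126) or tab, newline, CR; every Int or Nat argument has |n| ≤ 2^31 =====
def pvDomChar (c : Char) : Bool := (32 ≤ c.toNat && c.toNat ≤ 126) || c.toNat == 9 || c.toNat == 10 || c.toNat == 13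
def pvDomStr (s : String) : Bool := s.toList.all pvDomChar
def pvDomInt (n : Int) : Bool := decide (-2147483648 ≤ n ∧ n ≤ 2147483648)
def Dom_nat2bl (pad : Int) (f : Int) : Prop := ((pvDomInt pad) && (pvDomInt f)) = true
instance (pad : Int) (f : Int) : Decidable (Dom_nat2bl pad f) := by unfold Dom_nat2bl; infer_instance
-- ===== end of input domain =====

-- B replaces A's bit-by-bit recursion with one big-endian binary conversion plus arithmetic left-padding (idiomatic, not claimed faster).

-- ===== PORT A =====
-- A recurses: base case f == 0 returns pad zeros; otherwise recurse on the halved value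
-- and append the low bit. For f < 0 the Python recursion never terminates (RecursionError);
-- those inputs are outside Pre_nat2bl, and the port returns [] there only to be total.
def nat2bl (pad : Int) (f : Int) : List Int :=
  if f = 0 then List.replicate pad.toNat 0
  else if f < 0 then []  -- Python raises RecursionError here; excluded by Pre_nat2bl
  else if PySem.Int.mod f 2 = 1 then nat2bl (pad - 1) (PySem.Int.floordiv (f - 1) 2) ++ [1]
  else nat2bl (pad - 1) (PySem.Int.floordiv f 2) ++ [0]
termination_by f.toNat
decreasing_by
  · have h1 : PySem.Int.floordiv (f - 1) 2 = (f - 1) / 2 :=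
      PySem.Int.floordiv_eq_ediv_of_pos (by omega)
    rw [h1]; omega
  · have h1 : PySem.Int.floordiv f 2 = f / 2 :=
      PySem.Int.floordiv_eq_ediv_of_pos (by omega)
    rw [h1]; omega

-- ===== PORT B =====
-- bin(n)[2:] as a big-endian list of bits, for n > 0 (bin's digit loop).
def natBin (n : Nat) : List Int :=
  if n = 0 then [] else natBin (n / 2) ++ [((n % 2 : Nat) : Int)]
termination_by n
decreasing_by omega

def nat2bl_alt (pad : Int) (f : Int) : List Int :=
  if f = 0 then List.replicate pad.toNat 0
  else
    let bits := natBin f.toNat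
    List.replicate (pad - bits.length).toNat 0 ++ bits

-- ===== PRECONDITION & SPEC =====
-- Pre_ excludes f < 0: there Python A recurses forever ((f-1)//2 stays negative) and
-- raises RecursionError; B raises ValueError. A returns on exactly 0 ≤ f.
def Pre_nat2bl (pad : Int) (f : Int) : Prop := 0 ≤ f
instance (pad : Int) (f : Int) : Decidable (Pre_nat2bl pad f) := by unfold Pre_nat2bl; infer_instance
def pvWitness_nat2bl : Int × Int := (8, 6)

def Spec_nat2bl (pad : Int) (f : Int) (out : List Int) : Prop := out = nat2bl_alt pad f
instance (pad : Int) (f : Int) (out : List Int) : Decidable (Spec_nat2bl pad f out) := by unfold Spec_nat2bl; infer_instance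

-- ===== CLAIM (what is proved, stated in full; the proofs are below) =====
def Claim_equal_nat2bl : Prop := ∀ (pad : Int) (f : Int), Dom_nat2bl pad f → Pre_nat2bl pad f → Spec_nat2bl pad f (nat2bl pad f)

-- ===== LEMMAS AND PROOFS =====

-- Core invariant: for every positive n, A's recursion produces exactly the left-padded
-- big-endian bit list of n. Strong induction on n.
lemma nat2bl_pos (n : Nat) (pad : Int) (hn : 0 < n) :
    nat2bl pad (n : Int) = List.replicate (pad - (natBin n).length).toNat 0 ++ natBin n := by
  induction n using Nat.strong_induction_on generalizing pad with
  | _ n ih =>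
    have hfd1 : PySem.Int.floordiv ((n : Int) - 1) 2 = ((n - 1) / 2 : Nat) := by
      have := PySem.Int.floordiv_eq_ediv_of_pos (a := (n : Int) - 1) (b := 2) (by omega)
      rw [this]; omega
    have hfd2 : PySem.Int.floordiv (n : Int) 2 = ((n / 2 : Nat) : Int) := by
      have := PySem.Int.floordiv_eq_ediv_of_pos (a := (n : Int)) (b := 2) (by omega)
      rw [this]; omega
    have hmod : PySem.Int.mod (n : Int) 2 = ((n % 2 : Nat) : Int) := by
      have := PySem.Int.mod_eq_emod_of_pos (a := (n : Int)) (b := 2) (by omega)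
      rw [this]; omega
    rw [nat2bl, natBin]
    have hn0 : ¬ ((n : Int) = 0) := by omega
    have hnneg : ¬ ((n : Int) < 0) := by omega
    simp only [hn0, hnneg, if_false, hmod, hn.ne', List.length_append, List.length_singleton]
    by_cases hpar : n % 2 = 1
    · simp only [hpar, Nat.cast_one, hfd1]
      by_cases hz : (n - 1) / 2 = 0
      · have hn1 : n = 1 := by omega
        subst hn1
        rw [nat2bl, natBin]
        norm_num
      · rw [if_pos trivial, ih ((n - 1) / 2) (by omega) (pad - 1) (by omega)]
        have heq : (n - 1) / 2 = n / 2 := by omega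
        rw [heq, natBin]
        have hz' : ¬ (n / 2 = 0) := by omega
        simp only [hz', if_false]
        simp only [List.append_assoc]
        congr 2
        omega
    · have hpar0 : n % 2 = 0 := by omega
      simp only [hpar0, Nat.cast_zero]
      rw [if_neg (by norm_num), hfd2]
      rw [ih (n / 2) (by omega) (pad - 1) (by omega)]
      rw [natBin]
      have hz' : ¬ (n / 2 = 0) := by omega
      simp only [hz', if_false]
      simp only [List.append_assoc]
      congr 2
      omega

-- ===== VERDICT (by name: the statement is the Claim_ definition above) =====
theorem nat2bl_spec : Claim_equal_nat2bl := by
  intro pad f _ hpre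
  unfold Spec_nat2bl nat2bl_alt
  by_cases hf : f = 0
  · subst hf; rw [nat2bl]; simp
  · have hpos : 0 < f := lt_of_le_of_ne hpre (Ne.symm hf)
    rw [if_neg hf]
    have hcast : ((f.toNat : Nat) : Int) = f := Int.toNat_of_nonneg hpre
    have := nat2bl_pos f.toNat pad (by omega)
    rw [hcast] at this
    exact this
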